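-- pv_equiv track=rewrite | github.com/HavenGoitom/leetcode | totalNumbers.py | count_even_numbers
-- ===== SOURCE A (Python) =====
-- def count_even_numbers(digits):
--     even_digits = []
--     for d in digits:
--         if d % 2 == 0:
--             even_digits.append(d)
--
--     count = 0
--
--     for last_digit in even_digits:
--         for first_digit in digits:
--             if first_digit == 0:
--                 continue
--             if first_digit == last_digit:
--                 continue
--
--             for second_digit in digits:
--                 if second_digit == first_digit or second_digit == last_digit:
--                     continue
--
--                 count += 1
--
--     return count
-- ===== SOURCE B (Python) =====
-- def count_even_numbers(digits):
--     n = len(digits)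
--     counts = {}
--     for d in digits:
--         counts[d] = counts.get(d, 0) + 1
--     total = 0
--     for last, cl in counts.items():
--         if last % 2 != 0:
--             continue
--         for first, cf in counts.items():
--             if first == 0 or first == last:
--                 continue
--             total += cl * cf * (n - cf - cl)
--     return total
-- ===== Notes on version B (the rewrite author's own statement) =====
-- stated objective: faster
-- what changed: Replaces A's triple nested loop over list elements by a frequency dictionary built in one pass and an analytic double sum over distinct values, counting the admissible second digits with a closed formula n - count(first) - count(last).
import Mathlib
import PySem

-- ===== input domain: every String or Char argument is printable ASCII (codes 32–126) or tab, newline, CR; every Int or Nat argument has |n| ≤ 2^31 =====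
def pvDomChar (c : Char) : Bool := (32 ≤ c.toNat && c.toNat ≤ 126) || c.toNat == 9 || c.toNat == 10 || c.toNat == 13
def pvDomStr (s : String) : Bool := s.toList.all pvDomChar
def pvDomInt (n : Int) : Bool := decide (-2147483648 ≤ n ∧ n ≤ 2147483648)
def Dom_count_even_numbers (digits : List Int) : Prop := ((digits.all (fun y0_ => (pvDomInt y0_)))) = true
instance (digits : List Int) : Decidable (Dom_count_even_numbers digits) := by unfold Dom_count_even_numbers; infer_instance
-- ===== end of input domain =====

-- B replaces A's cubic triple loop over list elements by a frequency table and an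
-- analytic double sum over distinct values (objective: faster, asymptotic).

-- ===== PORT A =====
def count_even_numbers (digits : List Int) : Int :=
  let even_digits : List Int :=
    digits.foldl (fun acc d => if PySem.Int.mod d 2 == 0 then acc ++ [d] else acc) []
  even_digits.foldl (fun count last_digit =>
    digits.foldl (fun count first_digit =>
      if first_digit == 0 then count
      else if first_digit == last_digit then count
      else digits.foldl (fun count second_digit =>
        if second_digit == first_digit || second_digit == last_digit then count
        else count + 1) count) count) 0

-- ===== PORT B =====
def count_even_numbers_alt (digits : List Int) : Int :=
  let n : Int := digits.length
  let counts : PySem.Dict Int Int :=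
    digits.foldl (fun d x => d.insert x (d.getD x 0 + 1)) PySem.Dict.empty
  counts.items.foldl (fun total p =>
    if PySem.Int.mod p.1 2 != 0 then total
    else counts.items.foldl (fun total q =>
      if q.1 == 0 || q.1 == p.1 then total
      else total + p.2 * q.2 * (n - q.2 - p.2)) total) 0

-- ===== PRECONDITION & SPEC =====
def Spec_count_even_numbers (digits : List Int) (out : Int) : Prop := out = count_even_numbers_alt digits
instance (digits : List Int) (out : Int) : Decidable (Spec_count_even_numbers digits out) := by unfold Spec_count_even_numbers; infer_instance

-- ===== CLAIM (what is proved, stated in full; the proofs are below) =====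
def Claim_equal_count_even_numbers : Prop := ∀ (digits : List Int), Dom_count_even_numbers digits → Spec_count_even_numbers digits (count_even_numbers digits)

-- ===== LEMMAS AND PROOFS =====

def pvEven (d : Int) : Bool := d % 2 == 0

-- the contribution of one (last, first) choice of values: 0 if the guards skip it,
-- otherwise the number of admissible second digits
def pvG (digits : List Int) (l f : Int) : Int :=
  if f == 0 || f == l then 0
  else (digits.length : Int) - digits.count f - digits.count l

-- A's innermost loop counts the seconds differing from both fixed digits
theorem pv_inner (xs : List Int) (f l : Int) (h : f ≠ l) (c0 : Int) :
    xs.foldl (fun cnt s => if s == f || s == l then cnt else cnt + 1) c0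
      = c0 + ((xs.length : Int) - xs.count f - xs.count l) := by
  induction xs generalizing c0 with
  | nil => simp
  | cons x t ih =>
    simp only [List.foldl_cons, List.count_cons, List.length_cons]
    by_cases hc : (x == f || x == l) = true
    · rw [if_pos hc, ih c0]
      simp only [Bool.or_eq_true, beq_iff_eq] at hc
      rcases hc with hc | hc <;> subst hc <;> split_ifs with h1 h2 <;>
        simp only [beq_iff_eq] at * <;>
        first
          | exact absurd trivial (by assumption)
          | (push_cast; omega)
    · rw [if_neg hc, ih (c0 + 1)]
      simp only [Bool.or_eq_true, beq_iff_eq, not_or] at hc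
      obtain ⟨hcf, hcl⟩ := hc
      split_ifs with h1 h2 <;>
        simp only [beq_iff_eq] at * <;>
        first
          | exact absurd trivial (by assumption)
          | (push_cast; omega)

-- A's middle loop sums pvG over the occurrences of first in digits
theorem pv_middle (digits : List Int) (l c0 : Int) :
    digits.foldl (fun count first =>
      if first == 0 then count
      else if first == l then count
      else digits.foldl (fun count second =>
        if second == first || second == l then count
        else count + 1) count) c0
      = c0 + (digits.map (pvG digits l)).sum := by
  rw [PySem.List.foldl_congr_mem
      (g := fun (count : Int) (first : Int) => count + pvG digits l first)]
  · exact PySem.List.foldl_add _ _ _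
  · intro acc f _
    by_cases h0 : f = 0
    · simp [pvG, h0]
    · by_cases hl : f = l
      · simp [pvG, hl]
      · have : acc + pvG digits l f
            = acc + ((digits.length : Int) - digits.count f - digits.count l) := by
          simp [pvG, h0, hl]
        rw [this, ← pv_inner digits f l hl acc]
        simp [h0, hl]

-- A as a sum over the even elements of digits
theorem pv_A_eq (digits : List Int) :
    count_even_numbers digits
      = ((digits.filter pvEven).map (fun l => (digits.map (pvG digits l)).sum)).sum := by
  unfold count_even_numbers
  rw [PySem.List.foldl_append_if_eq_filter]
  simp only [List.nil_append]
  have hfe : (fun d : Int => PySem.Int.mod d 2 == 0) = pvEven := funext fun d => by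
    rw [PySem.Int.mod_eq_emod_of_pos (by norm_num)]; rfl
  rw [hfe]
  rw [PySem.List.foldl_congr_mem
      (g := fun (count : Int) (last : Int) => count + (digits.map (pvG digits last)).sum)]
  · rw [PySem.List.foldl_add, zero_add]
  · intro acc l _; exact pv_middle digits l acc

-- collapsing a plain sum over the list into a weighted sum over its distinct values
theorem pv_dedup_sum (xs : List Int) (φ : Int → Int) :
    ((PySem.List.dedup xs).map (fun v => (xs.count v : Int) * φ v)).sum
      = (xs.map φ).sum := by
  have h1 : (xs.map φ).sum = ∑ m ∈ xs.toFinset, xs.count m • φ m :=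
    Finset.sum_list_map_count xs φ
  have hnd : (PySem.List.dedup xs).Nodup := PySem.List.nodup_dedup xs
  have hts : (PySem.List.dedup xs).toFinset = xs.toFinset := by
    ext v; simp
  have h2 := List.sum_toFinset (fun v => (xs.count v : Int) * φ v) hnd
  rw [hts] at h2
  rw [h1, ← h2]
  exact Finset.sum_congr rfl (fun m _ => by simp)

-- a sum over a filtered list as a guarded sum over the whole list
theorem pv_filter_sum (xs : List Int) (p : Int → Bool) (F : Int → Int) :
    ((xs.filter p).map F).sum = (xs.map (fun x => if p x then F x else 0)).sum := by
  induction xs with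
  | nil => simp
  | cons x t ih =>
    by_cases h : p x <;> simp [h, ih]

-- B as the same double sum over the distinct values of digits
theorem pv_B_eq (digits : List Int) :
    count_even_numbers_alt digits
      = ((PySem.List.dedup digits).map (fun k =>
          if pvEven k then
            ((PySem.List.dedup digits).map (fun v =>
              if v == 0 || v == k then 0
              else (digits.count k : Int) * (digits.count v : Int) *
                ((digits.length : Int) - (digits.count v : Int) - (digits.count k : Int)))).sum
          else 0)).sum := by
  unfold count_even_numbers_alt
  simp only [PySem.Dict.foldl_insert_getD_add_one_eq_counter, PySem.Dict.items_counter,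
    ← PySem.List.dedup_eq_ofList, List.foldl_map]
  rw [PySem.List.foldl_congr_mem
      (g := fun (total : Int) (k : Int) =>
        total + (if pvEven k then
          ((PySem.List.dedup digits).map (fun v =>
            if v == 0 || v == k then 0
            else (digits.count k : Int) * (digits.count v : Int) *
              ((digits.length : Int) - (digits.count v : Int) - (digits.count k : Int)))).sum
        else 0))]
  · rw [PySem.List.foldl_add, zero_add]
  · intro acc k _
    have hm : PySem.Int.mod k 2 = k % 2 :=
      PySem.Int.mod_eq_emod_of_pos (by norm_num)
    by_cases he : pvEven k
    · have he' : k % 2 = 0 := by simpa [pvEven] using he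
      have hne : (PySem.Int.mod k 2 != 0) = false := by
        rw [hm, he']; decide
      rw [hne]
      simp only [Bool.false_eq_true, if_false, he, if_true]
      rw [PySem.List.foldl_congr_mem
          (g := fun (total : Int) (v : Int) =>
            total + (if v == 0 || v == k then 0
              else (digits.count k : Int) * (digits.count v : Int) *
                ((digits.length : Int) - (digits.count v : Int) - (digits.count k : Int))))]
      · exact PySem.List.foldl_add _ _ _
      · intro a v _
        by_cases hv : (v == 0 || v == k) = true
        · simp [hv]
        · simp only [Bool.not_eq_true] at hv
          simp [hv]
    · have he' : ¬ k % 2 = 0 := by simpa [pvEven] using he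
      have hne : (PySem.Int.mod k 2 != 0) = true := by
        rw [hm]; simpa [bne_iff_ne] using he'
      rw [hne]
      simp [he]

-- ===== VERDICT (by name: the statement is the Claim_ definition above) =====
theorem count_even_numbers_spec : Claim_equal_count_even_numbers := by
  intro digits _
  unfold Spec_count_even_numbers
  rw [pv_A_eq, pv_filter_sum,
      ← pv_dedup_sum digits (fun x => if pvEven x then (digits.map (pvG digits x)).sum else 0),
      pv_B_eq]
  refine congrArg List.sum (List.map_congr_left ?_)
  intro k hk
  by_cases he : pvEven k
  · simp only [he, if_true]
    rw [← pv_dedup_sum digits (pvG digits k), ← List.sum_map_mul_left]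
    refine congrArg List.sum (List.map_congr_left ?_)
    intro v hv
    by_cases h0 : (v == 0 || v == k) = true
    · simp [pvG, h0]
    · simp only [Bool.not_eq_true] at h0
      simp only [pvG, h0, Bool.false_eq_true, if_false]
      ring
  · simp [he]
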